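-- pv_equiv track=rewrite | github.com/hackclub/orpheus-engine | scripts/ysws_project_describer.py | select_images
-- ===== SOURCE A (Python) =====
-- from typing import Any, Dict, List, Optional, Tuple
--
-- def select_images(images: List[Dict[str, str]], max_images: int) -> List[Dict[str, str]]:
--     if not images:
--         return []
--
--     def score(img: Dict[str, str]) -> int:
--         alt = (img.get("alt") or "").lower()
--         url = img.get("url") or ""
--         score = 0
--         for kw in ["pcb", "schematic", "wiring", "board", "hardware", "sensor", "robot", "prototype"]:
--             if kw in alt:
--                 score += 2
--             if kw in url.lower():
--                 score += 1
--         return score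
--
--     ranked = sorted(images, key=score, reverse=True)
--     return ranked[:max_images]
-- ===== SOURCE B (Python) =====
-- from typing import Dict, List
--
-- _KEYWORDS = ["pcb", "schematic", "wiring", "board", "hardware", "sensor", "robot", "prototype"]
--
--
-- def _score(img: Dict[str, str]) -> int:
--     alt = (img.get("alt") or "").lower()
--     url = (img.get("url") or "").lower()
--     return sum((2 if kw in alt else 0) + (1 if kw in url else 0) for kw in _KEYWORDS)
--
--
-- def select_images(images: List[Dict[str, str]], max_images: int) -> List[Dict[str, str]]:
--     # Bucket images by score (bounded 0..24); emitting buckets from high score to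
--     # low, keeping input order inside each bucket, reproduces the stable
--     # descending sort exactly.
--     buckets = [[] for _ in range(25)]
--     for img in images:
--         buckets[_score(img)].append(img)
--     ranked = []
--     for s in range(24, -1, -1):
--         ranked.extend(buckets[s])
--     return ranked[:max_images]
-- ===== Notes on version B (the rewrite author's own statement) =====
-- stated objective: alternative
-- what changed: Replaces the comparison sort by a single-pass bucket/counting pass over the bounded score range 0..24, emitting buckets from the highest score down (input order inside each bucket reproduces the stable descending sort), then applies the same [:max_images] slice.
import Mathlib
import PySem

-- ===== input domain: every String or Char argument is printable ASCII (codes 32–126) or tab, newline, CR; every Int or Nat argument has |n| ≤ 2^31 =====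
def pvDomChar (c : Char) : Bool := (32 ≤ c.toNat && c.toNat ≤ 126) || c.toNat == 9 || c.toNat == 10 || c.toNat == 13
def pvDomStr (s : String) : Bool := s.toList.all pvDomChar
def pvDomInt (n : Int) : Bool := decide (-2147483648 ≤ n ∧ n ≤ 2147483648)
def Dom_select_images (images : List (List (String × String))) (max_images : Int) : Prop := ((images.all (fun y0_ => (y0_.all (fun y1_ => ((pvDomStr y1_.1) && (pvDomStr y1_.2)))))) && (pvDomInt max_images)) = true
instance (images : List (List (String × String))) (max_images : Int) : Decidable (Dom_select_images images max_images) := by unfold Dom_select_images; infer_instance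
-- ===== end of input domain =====

-- B replaces the stable descending sort by one bucketing pass over the bounded score range 0..24 (alternative algorithm, same result).

-- ===== PORT A =====
def kwList : List String := ["pcb", "schematic", "wiring", "board", "hardware", "sensor", "robot", "prototype"]

def scoreA (img : List (String × String)) : Int :=
  let alt := PySem.Str.lower ((PySem.Dict.mk img).getD "alt" "")
  let url := (PySem.Dict.mk img).getD "url" ""
  kwList.foldl (fun s kw =>
    let s1 := if PySem.Str.isIn kw alt then s + 2 else s
    if PySem.Str.isIn kw (PySem.Str.lower url) then s1 + 1 else s1) 0

def select_images (images : List (List (String × String))) (max_images : Int) : List (List (String × String)) :=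
  if images = [] then []
  else
    let ranked := PySem.List.sorted images scoreA true
    PySem.List.slice ranked none (some max_images)

-- ===== PORT B =====
def kwListB : List String := ["pcb", "schematic", "wiring", "board", "hardware", "sensor", "robot", "prototype"]

def scoreB (img : List (String × String)) : Int :=
  let alt := PySem.Str.lower ((PySem.Dict.mk img).getD "alt" "")
  let url := PySem.Str.lower ((PySem.Dict.mk img).getD "url" "")
  (kwListB.map (fun kw =>
    (if PySem.Str.isIn kw alt then (2 : Int) else 0) +
    (if PySem.Str.isIn kw url then (1 : Int) else 0))).sum

def select_images_alt (images : List (List (String × String))) (max_images : Int) : List (List (String × String)) :=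
  let buckets0 : List (List (List (String × String))) := List.replicate 25 []
  let buckets := images.foldl (fun bs img =>
    let k := (scoreB img).toNat
    bs.set k (bs.getD k [] ++ [img])) buckets0
  let ranked := (PySem.List.pyRange 24 (-1) (-1)).foldl (fun acc s => acc ++ buckets.getD s.toNat []) []
  PySem.List.slice ranked none (some max_images)

-- ===== PRECONDITION & SPEC =====
def Spec_select_images (images : List (List (String × String))) (max_images : Int) (out : List (List (String × String))) : Prop := out = select_images_alt images max_images
instance (images : List (List (String × String))) (max_images : Int) (out : List (List (String × String))) : Decidable (Spec_select_images images max_images out) := by unfold Spec_select_images; infer_instance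

-- ===== CLAIM (what is proved, stated in full; the proofs are below) =====
def Claim_equal_select_images : Prop := ∀ (images : List (List (String × String))) (max_images : Int), Dom_select_images images max_images → Spec_select_images images max_images (select_images images max_images)

-- ===== LEMMAS AND PROOFS =====

-- the descending score list range(24, -1, -1)
def SLit : List Int := [24,23,22,21,20,19,18,17,16,15,14,13,12,11,10,9,8,7,6,5,4,3,2,1,0]

lemma pyRange_eq_SLit : PySem.List.pyRange 24 (-1) (-1) = SLit := by decide

lemma SLit_pairwise : SLit.Pairwise (· > ·) := by decide

lemma SLit_bounds : ∀ s ∈ SLit, 0 ≤ s ∧ s ≤ 24 := by decide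

lemma mem_SLit (s : Int) (h1 : 0 ≤ s) (h2 : s ≤ 24) : s ∈ SLit := by
  unfold SLit; interval_cases s <;> decide

lemma foldA_eq (alt urlL : String) (kws : List String) : ∀ (acc : Int),
    kws.foldl (fun s kw =>
      let s1 := if PySem.Str.isIn kw alt then s + 2 else s
      if PySem.Str.isIn kw urlL then s1 + 1 else s1) acc
    = acc + (kws.map (fun kw =>
      (if PySem.Str.isIn kw alt then (2 : Int) else 0) +
      (if PySem.Str.isIn kw urlL then (1 : Int) else 0))).sum := by
  induction kws with
  | nil => simp
  | cons kw kws ih =>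
    intro acc
    simp only [List.foldl_cons, List.map_cons, List.sum_cons]
    rw [ih]
    split_ifs <;> ring

lemma score_eq (img : List (String × String)) : scoreA img = scoreB img := by
  unfold scoreA scoreB kwList kwListB
  rw [foldA_eq]
  ring

lemma sum_bounds (f : String → Int) (h : ∀ kw, 0 ≤ f kw ∧ f kw ≤ 3) (l : List String) :
    0 ≤ (l.map f).sum ∧ (l.map f).sum ≤ 3 * (l.length : Int) := by
  induction l with
  | nil => simp
  | cons kw l ih =>
    have := h kw
    simp only [List.map_cons, List.sum_cons, List.length_cons]
    push_cast
    omega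

lemma scoreB_bounds (img : List (String × String)) : 0 ≤ scoreB img ∧ scoreB img ≤ 24 := by
  unfold scoreB
  have h := sum_bounds
    (fun kw =>
      (if PySem.Str.isIn kw (PySem.Str.lower ((PySem.Dict.mk img).getD "alt" "")) then (2 : Int) else 0) +
      (if PySem.Str.isIn kw (PySem.Str.lower ((PySem.Dict.mk img).getD "url" "")) then (1 : Int) else 0))
    (by intro kw; dsimp only; split_ifs <;> omega) kwListB
  simpa [kwListB] using h

lemma insertBy_app {α : Type} (p : α → α → Bool) (x : α) (A B : List α)
    (hA : ∀ a ∈ A, p x a = false) (hB : ∀ b ∈ B, p x b = true) :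
    PySem.List.insertBy p x (A ++ B) = A ++ x :: B := by
  induction A with
  | nil =>
    cases B with
    | nil => simp [PySem.List.insertBy]
    | cons b B' => simp [PySem.List.insertBy, hB b (by simp)]
  | cons a A' ih =>
    simp only [List.cons_append, PySem.List.insertBy, hA a (by simp)]
    simp only [Bool.false_eq_true, if_false]
    rw [ih (fun a ha => hA a (by simp [ha]))]

lemma flatMap_congr' {α β : Type} (l : List α) (f g : α → List β)
    (h : ∀ a ∈ l, f a = g a) : l.flatMap f = l.flatMap g := by
  induction l with
  | nil => rfl
  | cons a l ih =>
    simp only [List.flatMap_cons]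
    rw [h a (by simp), ih (fun a ha => h a (by simp [ha]))]

lemma sorted_rev_buckets {α : Type} (key : α → Int) (S : List Int) (hS : S.Pairwise (· > ·)) :
    ∀ xs : List α, (∀ x ∈ xs, key x ∈ S) →
      PySem.List.sorted xs key true = S.flatMap (fun s => xs.filter (fun x => decide (key x = s))) := by
  intro xs
  induction xs using List.reverseRecOn with
  | nil =>
    intro _
    rw [PySem.List.sorted_rev_eq_foldl_insertBy]
    simp
  | append_singleton xs x ih =>
    intro hmem
    have hx : key x ∈ S := hmem x (by simp)
    obtain ⟨S1, S2, rfl⟩ := List.append_of_mem hx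
    rw [List.pairwise_append] at hS
    obtain ⟨hS1, hS2c, hcross⟩ := hS
    rw [List.pairwise_cons] at hS2c
    obtain ⟨hgt2, hS2⟩ := hS2c
    have h1gt : ∀ s ∈ S1, s > key x := fun s hs => hcross s hs (key x) (by simp)
    rw [PySem.List.sorted_rev_eq_foldl_insertBy, List.foldl_append, List.foldl_cons, List.foldl_nil,
        ← PySem.List.sorted_rev_eq_foldl_insertBy,
        ih (fun y hy => hmem y (by simp [hy]))]
    -- LHS: insertBy into the bucket decomposition
    simp only [List.flatMap_append, List.flatMap_cons]
    have hfilt : ∀ s : Int, (xs ++ [x]).filter (fun y => decide (key y = s))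
        = xs.filter (fun y => decide (key y = s)) ++ (if key x = s then [x] else []) := by
      intro s
      rw [List.filter_append]
      congr 1
      by_cases h : key x = s <;> simp [h]
    have key_of_mem_filter : ∀ (s : Int) (y : α), y ∈ xs.filter (fun z => decide (key z = s)) → key y = s := by
      intro s y hy
      have := List.of_mem_filter hy
      simpa using this
    have hA : ∀ a ∈ S1.flatMap (fun s => xs.filter (fun y => decide (key y = s)))
        ++ xs.filter (fun y => decide (key y = key x)),
        (decide (key a < key x)) = false := by
      intro a ha
      rw [List.mem_append] at ha
      rcases ha with ha | ha
      · rw [List.mem_flatMap] at ha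
        obtain ⟨s, hs, hy⟩ := ha
        have := key_of_mem_filter s a hy
        have := h1gt s hs
        simp; omega
      · have := key_of_mem_filter (key x) a ha
        simp; omega
    have hB : ∀ b ∈ S2.flatMap (fun s => xs.filter (fun y => decide (key y = s))),
        (decide (key b < key x)) = true := by
      intro b hb
      rw [List.mem_flatMap] at hb
      obtain ⟨s, hs, hy⟩ := hb
      have := key_of_mem_filter s b hy
      have := hgt2 s hs
      simp; omega
    have := insertBy_app (fun a b => decide (key b < key a)) x
      (S1.flatMap (fun s => xs.filter (fun y => decide (key y = s))) ++ xs.filter (fun y => decide (key y = key x)))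
      (S2.flatMap (fun s => xs.filter (fun y => decide (key y = s)))) hA hB
    rw [List.append_assoc] at this
    rw [this]
    -- RHS: rewrite each bucket of xs ++ [x]
    have e1 : S1.flatMap (fun s => (xs ++ [x]).filter (fun y => decide (key y = s)))
        = S1.flatMap (fun s => xs.filter (fun y => decide (key y = s))) :=
      flatMap_congr' _ _ _ (fun s hs => by
        rw [hfilt s, if_neg (by have := h1gt s hs; omega)]; simp)
    have e2 : S2.flatMap (fun s => (xs ++ [x]).filter (fun y => decide (key y = s)))
        = S2.flatMap (fun s => xs.filter (fun y => decide (key y = s))) :=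
      flatMap_congr' _ _ _ (fun s hs => by
        rw [hfilt s, if_neg (by have := hgt2 s hs; omega)]; simp)
    have e3 : (xs ++ [x]).filter (fun y => decide (key y = key x))
        = xs.filter (fun y => decide (key y = key x)) ++ [x] := by
      rw [hfilt (key x), if_pos rfl]
    rw [e1, e2, e3]
    simp [List.append_assoc]

lemma buckets_spec : ∀ (imgs : List (List (String × String))) (bs : List (List (List (String × String)))),
    bs.length = 25 → ∀ n : Nat, n < 25 →
    (imgs.foldl (fun bs img =>
        let k := (scoreB img).toNat
        bs.set k (bs.getD k [] ++ [img])) bs).getD n []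
      = bs.getD n [] ++ imgs.filter (fun i => decide (scoreB i = (n : Int))) := by
  intro imgs
  induction imgs with
  | nil => intro bs _ n _; simp
  | cons img imgs ih =>
    intro bs hlen n hn
    simp only [List.foldl_cons, List.filter_cons]
    have hb := scoreB_bounds img
    have hk25 : (scoreB img).toNat < 25 := by omega
    rw [ih _ (by simp [hlen]) n hn]
    by_cases h : n = (scoreB img).toNat
    · subst h
      have hset : (bs.set (scoreB img).toNat (bs.getD (scoreB img).toNat [] ++ [img])).getD (scoreB img).toNat []
          = bs.getD (scoreB img).toNat [] ++ [img] := by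
        rw [List.getD_eq_getElem?_getD, List.getElem?_set, if_pos rfl, if_pos (by omega)]
        simp
      rw [hset]
      have : decide (scoreB img = ((scoreB img).toNat : Int)) = true := by simp; omega
      rw [this]
      simp [List.append_assoc]
    · have hset : (bs.set (scoreB img).toNat (bs.getD (scoreB img).toNat [] ++ [img])).getD n []
          = bs.getD n [] := by
        rw [List.getD_eq_getElem?_getD, List.getElem?_set, if_neg (by omega)]
        rw [← List.getD_eq_getElem?_getD]
      rw [hset]
      have : decide (scoreB img = (n : Int)) = false := by simp; omega
      rw [this]
      simp

lemma alt_char (images : List (List (String × String))) (m : Int) :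
    select_images_alt images m
      = PySem.List.slice (SLit.flatMap (fun s => images.filter (fun x => decide (scoreB x = s)))) none (some m) := by
  unfold select_images_alt
  dsimp only
  rw [pyRange_eq_SLit, PySem.List.foldl_append_eq_flatMap]
  rw [List.nil_append]
  congr 1
  apply flatMap_congr'
  intro s hs
  have hsb := SLit_bounds s hs
  have h1 : (s.toNat : Int) = s := by omega
  rw [buckets_spec images (List.replicate 25 []) (by simp) s.toNat (by omega)]
  rw [List.getD_eq_getElem?_getD, List.getElem?_replicate, if_pos (by omega)]
  simp [h1]

lemma slice_nil {α : Type} (m : Int) : PySem.List.slice ([] : List α) none (some m) = [] := by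
  simp [PySem.List.slice]

-- ===== VERDICT (by name: the statement is the Claim_ definition above) =====
theorem select_images_spec : Claim_equal_select_images := by
  intro images m _
  unfold Spec_select_images
  rw [alt_char]
  unfold select_images
  by_cases hne : images = []
  · subst hne
    rw [if_pos rfl]
    have : SLit.flatMap (fun s => ([] : List (List (String × String))).filter (fun x => decide (scoreB x = s))) = [] := by
      simp
    rw [this, slice_nil]
  · rw [if_neg hne]
    have hkey : scoreA = scoreB := funext score_eq
    have := sorted_rev_buckets scoreB SLit SLit_pairwise images
      (fun x _ => mem_SLit (scoreB x) (scoreB_bounds x).1 (scoreB_bounds x).2)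
    simp only [hkey, this]
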